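-- pv_equiv track=rewrite | github.com/AshutoshJha07/extractive-document-summarization | dataload.py | _countMatchingTestData
-- ===== SOURCE A (Python) =====
-- def _countMatchingTestData(sentences, summaries):
--     size = 0
--     hit = 0
--     hitsize = 0
--     for s in sentences.keys():
--         if s in summaries:
--             hit += 1
--             hitsize += len(sentences[s])
--         size += len(sentences[s])
--     return size, hit, hitsize
-- ===== SOURCE B (Python) =====
-- def _countMatchingTestData(sentences, summaries):
--     # Reversed traversal: size from the values alone; hit/hitsize by scanning
--     # the summaries and probing the sentences dict (correct because dict keys
--     # are unique, so the matched keys are the same set either way round).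
--     size = sum(map(len, sentences.values()))
--     hit = 0
--     hitsize = 0
--     for k in summaries:
--         if k in sentences:
--             hit += 1
--             hitsize += len(sentences[k])
--     return size, hit, hitsize
-- ===== Notes on version B (the rewrite author's own statement) =====
-- stated objective: alternative
-- what changed: Reversed the traversal direction: A makes one pass over the sentences keys testing membership in summaries; B computes size from the values alone and finds hit/hitsize by scanning the summaries and probing the sentences dict, correct because dict keys are unique so the matched key set is the same either way.
import Mathlib
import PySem

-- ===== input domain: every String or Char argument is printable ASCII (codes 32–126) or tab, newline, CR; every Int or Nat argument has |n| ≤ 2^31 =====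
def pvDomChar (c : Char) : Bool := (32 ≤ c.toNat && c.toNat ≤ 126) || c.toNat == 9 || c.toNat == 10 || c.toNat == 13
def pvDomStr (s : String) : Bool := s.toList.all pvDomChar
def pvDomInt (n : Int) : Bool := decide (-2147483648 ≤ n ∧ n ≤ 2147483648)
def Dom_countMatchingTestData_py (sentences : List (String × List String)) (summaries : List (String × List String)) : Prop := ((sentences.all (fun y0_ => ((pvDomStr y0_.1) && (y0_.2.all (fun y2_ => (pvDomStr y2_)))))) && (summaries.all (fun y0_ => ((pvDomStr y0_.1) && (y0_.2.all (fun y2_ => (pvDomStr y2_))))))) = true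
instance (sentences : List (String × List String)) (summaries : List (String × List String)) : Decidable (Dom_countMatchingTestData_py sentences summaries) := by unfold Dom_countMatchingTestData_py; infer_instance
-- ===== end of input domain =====

-- B reverses the traversal: A scans sentences' keys testing membership in summaries; B sums
-- sizes from the values alone and scans summaries' keys probing the sentences dict; objective: alternative.


-- ===== PORT A =====
-- for s in sentences.keys(): membership test 's in summaries', lookups sentences[s]
def countMatchingTestData_py (sentences : List (String × List String)) (summaries : List (String × List String)) : Int × Int × Int :=
  let d : PySem.Dict String (List String) := PySem.Dict.mk sentences
  let sm : PySem.Dict String (List String) := PySem.Dict.mk summaries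
  let st := (sentences.map Prod.fst).foldl (fun (st : Int × Int × Int) s =>
    let len : Int := (d.getD s []).length
    let hh : Int × Int := if sm.contains s then (st.2.1 + 1, st.2.2 + len) else (st.2.1, st.2.2)
    (st.1 + len, hh.1, hh.2)) (0, 0, 0)
  st

-- ===== PORT B =====
-- size from the values alone; hit/hitsize by scanning summaries' keys and probing sentences
def countMatchingTestData_py_alt (sentences : List (String × List String)) (summaries : List (String × List String)) : Int × Int × Int :=
  let d : PySem.Dict String (List String) := PySem.Dict.mk sentences
  let size : Int := (sentences.map (fun p => (p.2.length : Int))).sum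
  let hh := (summaries.map Prod.fst).foldl (fun (st : Int × Int) k =>
    if d.contains k then (st.1 + 1, st.2 + ((d.getD k []).length : Int)) else st) (0, 0)
  (size, hh.1, hh.2)

-- ===== PRECONDITION & SPEC =====
-- Pre_ excludes association lists with duplicate keys (in either argument): such a list does
-- not represent any Python dict (both arguments are dicts in Python, whose keys are
-- necessarily distinct), so no Python input is excluded.
def Pre_countMatchingTestData_py (sentences : List (String × List String)) (summaries : List (String × List String)) : Prop :=
  (sentences.map Prod.fst).Nodup ∧ (summaries.map Prod.fst).Nodup
instance (sentences : List (String × List String)) (summaries : List (String × List String)) : Decidable (Pre_countMatchingTestData_py sentences summaries) := by unfold Pre_countMatchingTestData_py; infer_instance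
def pvWitness_countMatchingTestData_py : (List (String × List String)) × (List (String × List String)) :=
  ([("a", ["x", "y"]), ("b", ["z"])], [("a", []), ("c", ["w"])])

def Spec_countMatchingTestData_py (sentences : List (String × List String)) (summaries : List (String × List String)) (out : Int × Int × Int) : Prop := out = countMatchingTestData_py_alt sentences summaries
instance (sentences : List (String × List String)) (summaries : List (String × List String)) (out : Int × Int × Int) : Decidable (Spec_countMatchingTestData_py sentences summaries out) := by unfold Spec_countMatchingTestData_py; infer_instance

-- ===== CLAIM (what is proved, stated in full; the proofs are below) =====
def Claim_equal_countMatchingTestData_py : Prop := ∀ (sentences : List (String × List String)) (summaries : List (String × List String)), Dom_countMatchingTestData_py sentences summaries → Pre_countMatchingTestData_py sentences summaries → Spec_countMatchingTestData_py sentences summaries (countMatchingTestData_py sentences summaries)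

-- ===== LEMMAS AND PROOFS =====

-- A's fold, when every lookup d.getD p.1 [] returns that pair's own value, computes
-- (Σ len, #matched, Σ matched len) over the list, offsetting the initial accumulator.
theorem foldA_eq (sm d : PySem.Dict String (List String)) :
    ∀ (l : List (String × List String)) (a b c : Int),
    (∀ p ∈ l, d.getD p.1 [] = p.2) →
    (l.map Prod.fst).foldl (fun (st : Int × Int × Int) s =>
      let len : Int := (d.getD s []).length
      let hh : Int × Int := if sm.contains s then (st.2.1 + 1, st.2.2 + len) else (st.2.1, st.2.2)
      (st.1 + len, hh.1, hh.2)) (a, b, c)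
    = (a + (l.map (fun p => (p.2.length : Int))).sum,
       b + (((l.filter (fun p => sm.contains p.1)).length : Int)),
       c + (((l.filter (fun p => sm.contains p.1)).map (fun p => (p.2.length : Int))).sum)) := by
  intro l
  induction l with
  | nil => intro a b c _; simp
  | cons p rest ih =>
    intro a b c h
    have hp : d.getD p.1 [] = p.2 := h p (List.mem_cons_self)
    have hrest : ∀ q ∈ rest, d.getD q.1 [] = q.2 := fun q hq => h q (List.mem_cons_of_mem _ hq)
    rw [List.map_cons, List.foldl_cons]
    by_cases hc : sm.contains p.1 = true
    · simp only [hp, hc, if_true]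
      rw [ih _ _ _ hrest]
      rw [List.filter_cons_of_pos (by simpa using hc)]
      simp only [List.map_cons, List.sum_cons, List.length_cons, Prod.mk.injEq]
      refine ⟨by ring, by push_cast; ring, by ring⟩
    · simp only [hp, hc]
      rw [ih _ _ _ hrest]
      rw [List.filter_cons_of_neg (by simpa using hc)]
      simp only [List.map_cons, List.sum_cons, Prod.mk.injEq]
      exact ⟨by ring, rfl, rfl⟩

-- B's fold over a key list counts the keys contained in d and sums their stored lengths.
theorem foldB_eq (d : PySem.Dict String (List String)) :
    ∀ (ks : List String) (a b : Int),
    ks.foldl (fun (st : Int × Int) k =>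
      if d.contains k then (st.1 + 1, st.2 + ((d.getD k []).length : Int)) else st) (a, b)
    = (a + ((ks.filter (fun k => d.contains k)).length : Int),
       b + ((ks.filter (fun k => d.contains k)).map (fun k => ((d.getD k []).length : Int))).sum) := by
  intro ks
  induction ks with
  | nil => intro a b; simp
  | cons k rest ih =>
    intro a b
    rw [List.foldl_cons]
    by_cases hc : d.contains k = true
    · simp only [hc, if_true]
      rw [ih]
      rw [List.filter_cons_of_pos (by simpa using hc)]
      simp only [List.map_cons, List.sum_cons, List.length_cons, Prod.mk.injEq]
      refine ⟨by push_cast; ring, by ring⟩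
    · simp only [hc]
      rw [ih]
      rw [List.filter_cons_of_neg (by simpa using hc)]
      simp

theorem getD_mk_self (l : List (String × List String)) (h : (l.map Prod.fst).Nodup) :
    ∀ p ∈ l, (PySem.Dict.mk l).getD p.1 [] = p.2 := by
  intro p hp
  exact PySem.Dict.getD_of_mem_items (d := PySem.Dict.mk l) hp h []

-- The key lists of the two filters are permutations of one another: both are duplicate-free
-- and both hold exactly the keys common to sentences and summaries.
theorem matched_keys_perm (sentences summaries : List (String × List String))
    (hs : (sentences.map Prod.fst).Nodup) (hm : (summaries.map Prod.fst).Nodup) :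
    ((sentences.filter (fun p => (PySem.Dict.mk summaries).contains p.1)).map Prod.fst).Perm
      ((summaries.map Prod.fst).filter (fun k => (PySem.Dict.mk sentences).contains k)) := by
  have h1 : ((sentences.filter (fun p => (PySem.Dict.mk summaries).contains p.1)).map Prod.fst).Nodup :=
    hs.sublist (List.Sublist.map Prod.fst List.filter_sublist)
  have h2 : ((summaries.map Prod.fst).filter (fun k => (PySem.Dict.mk sentences).contains k)).Nodup :=
    hm.filter _
  rw [List.perm_ext_iff_of_nodup h1 h2]
  intro k
  simp only [List.mem_map, List.mem_filter,
    PySem.Dict.contains_eq_decide_mem_keys, PySem.Dict.keys_mk, decide_eq_true_eq]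
  constructor
  · rintro ⟨p, ⟨hpl, hpk⟩, rfl⟩
    exact ⟨hpk, ⟨p, hpl, rfl⟩⟩
  · rintro ⟨⟨q, hql, rfl⟩, p, hpl, hpk⟩
    exact ⟨p, ⟨hpl, hpk ▸ ⟨q, hql, rfl⟩⟩, hpk⟩

-- ===== VERDICT (by name: the statement is the Claim_ definition above) =====
theorem countMatchingTestData_py_spec : Claim_equal_countMatchingTestData_py := by
  intro sentences summaries _ hpre
  obtain ⟨hs, hm⟩ := hpre
  show countMatchingTestData_py sentences summaries = countMatchingTestData_py_alt sentences summaries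
  simp only [countMatchingTestData_py, countMatchingTestData_py_alt]
  rw [foldA_eq _ _ sentences 0 0 0 (getD_mk_self sentences hs), foldB_eq]
  have hperm := matched_keys_perm sentences summaries hs hm
  set F := sentences.filter (fun p => (PySem.Dict.mk summaries).contains p.1) with hF
  -- the filtered values are the stored values of the matched keys
  have hmapF : F.map (fun p => (p.2.length : Int))
      = (F.map Prod.fst).map (fun k => (((PySem.Dict.mk sentences).getD k []).length : Int)) := by
    rw [List.map_map]
    refine (List.map_congr_left ?_).symm
    intro p hpF
    have hpl : p ∈ sentences := List.mem_of_mem_filter hpF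
    simp [Function.comp, getD_mk_self sentences hs p hpl]
  refine Prod.ext (by simp) (Prod.ext ?_ ?_)
  · have h := hperm.length_eq
    rw [List.length_map] at h
    simp [h]
  · have h := (hperm.map (fun k => (((PySem.Dict.mk sentences).getD k []).length : Int))).sum_eq
    rw [hmapF]
    simpa using h
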